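-- pv_equiv track=rewrite | github.com/gueguet/codewars_solution | python/5kyu/escape_with_your_booty.py | navy_is_close
-- ===== SOURCE A (Python) =====
-- def navy_is_close(my_ship, list_navy):
--   for navy in list_navy:
--     if ((navy[0] - my_ship[0] == 0) and  (abs(navy[1] - my_ship[1]) == 1)):
--       return True
--     if ((navy[1] - my_ship[1] == 0) and  (abs(navy[0] - my_ship[0]) == 1)):
--       return True
--     if ((navy[1] - my_ship[1] == 1) and  (abs(navy[0] - my_ship[0]) == 1)):
--       return True
--
--   return False
-- ===== SOURCE B (Python) =====
-- def navy_is_close(my_ship, list_navy):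
--     mx, my = my_ship[0], my_ship[1]
--     navy_set = {(n[0], n[1]) for n in list_navy}
--     candidates = ((mx, my - 1), (mx, my + 1),
--                   (mx - 1, my), (mx + 1, my),
--                   (mx - 1, my + 1), (mx + 1, my + 1))
--     return any(c in navy_set for c in candidates)
-- ===== Notes on version B (the rewrite author's own statement) =====
-- stated objective: idiomatic
-- what changed: B replaces A's per-ship condition tests with a set of navy positions probed at the six fixed neighbor cells A matches (orthogonal plus the two upper diagonals).
import Mathlib
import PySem

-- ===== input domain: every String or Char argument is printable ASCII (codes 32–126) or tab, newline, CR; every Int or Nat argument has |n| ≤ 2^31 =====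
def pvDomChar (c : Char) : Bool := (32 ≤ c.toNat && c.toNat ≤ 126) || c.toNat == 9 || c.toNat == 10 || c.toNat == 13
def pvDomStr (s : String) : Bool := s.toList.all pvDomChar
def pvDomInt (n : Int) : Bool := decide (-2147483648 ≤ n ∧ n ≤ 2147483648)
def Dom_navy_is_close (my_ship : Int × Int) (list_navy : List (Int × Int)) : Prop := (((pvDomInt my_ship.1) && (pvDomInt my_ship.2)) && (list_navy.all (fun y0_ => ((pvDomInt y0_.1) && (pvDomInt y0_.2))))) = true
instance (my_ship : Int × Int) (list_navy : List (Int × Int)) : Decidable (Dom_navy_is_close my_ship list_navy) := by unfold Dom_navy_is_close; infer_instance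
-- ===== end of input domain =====

-- B probes a set of navy positions at the six fixed neighbor cells instead of testing conditions per ship (idiomatic alternative, same cost).


-- ===== PORT A =====
def navy_is_close (my_ship : Int × Int) (list_navy : List (Int × Int)) : Bool :=
  match list_navy with
  | [] => false
  | navy :: rest =>
    if (navy.1 - my_ship.1 == 0) && ((navy.2 - my_ship.2).natAbs == 1) then true
    else if (navy.2 - my_ship.2 == 0) && ((navy.1 - my_ship.1).natAbs == 1) then true
    else if (navy.2 - my_ship.2 == 1) && ((navy.1 - my_ship.1).natAbs == 1) then true
    else navy_is_close my_ship rest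

-- ===== PORT B =====
def navy_is_close_alt (my_ship : Int × Int) (list_navy : List (Int × Int)) : Bool :=
  let mx := my_ship.1
  let my := my_ship.2
  let navy_set : PySem.Set (Int × Int) := PySem.Set.ofList list_navy
  let candidates : List (Int × Int) :=
    [(mx, my - 1), (mx, my + 1), (mx - 1, my), (mx + 1, my), (mx - 1, my + 1), (mx + 1, my + 1)]
  candidates.any (fun c => PySem.Set.contains navy_set c)

-- ===== PRECONDITION & SPEC =====
def Spec_navy_is_close (my_ship : Int × Int) (list_navy : List (Int × Int)) (out : Bool) : Prop := out = navy_is_close_alt my_ship list_navy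
instance (my_ship : Int × Int) (list_navy : List (Int × Int)) (out : Bool) : Decidable (Spec_navy_is_close my_ship list_navy out) := by unfold Spec_navy_is_close; infer_instance

-- ===== CLAIM (what is proved, stated in full; the proofs are below) =====
def Claim_equal_navy_is_close : Prop := ∀ (my_ship : Int × Int) (list_navy : List (Int × Int)), Dom_navy_is_close my_ship list_navy → Spec_navy_is_close my_ship list_navy (navy_is_close my_ship list_navy)

-- ===== LEMMAS AND PROOFS =====

lemma A_iff (ms : Int × Int) (l : List (Int × Int)) :
    navy_is_close ms l = true ↔ ∃ n ∈ l,
      ((n.1 - ms.1 = 0 ∧ (n.2 - ms.2).natAbs = 1) ∨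
       (n.2 - ms.2 = 0 ∧ (n.1 - ms.1).natAbs = 1) ∨
       (n.2 - ms.2 = 1 ∧ (n.1 - ms.1).natAbs = 1)) := by
  induction l with
  | nil => simp [navy_is_close]
  | cons n rest ih =>
    simp only [navy_is_close, List.mem_cons]
    split_ifs with h1 h2 h3 <;>
      simp_all <;> tauto

lemma B_iff (ms : Int × Int) (l : List (Int × Int)) :
    navy_is_close_alt ms l = true ↔ ∃ c ∈
      [(ms.1, ms.2 - 1), (ms.1, ms.2 + 1), (ms.1 - 1, ms.2), (ms.1 + 1, ms.2),
       (ms.1 - 1, ms.2 + 1), (ms.1 + 1, ms.2 + 1)], c ∈ l := by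
  simp [navy_is_close_alt, PySem.Set.contains, PySem.Set.mem_ofList, List.any_eq_true]

-- ===== VERDICT (by name: the statement is the Claim_ definition above) =====
theorem navy_is_close_spec : Claim_equal_navy_is_close := by
  intro ms l _
  unfold Spec_navy_is_close
  rw [Bool.eq_iff_iff, A_iff, B_iff]
  constructor
  · rintro ⟨n, hn, h⟩
    have hx : n = (ms.1, ms.2 - 1) ∨ n = (ms.1, ms.2 + 1) ∨ n = (ms.1 - 1, ms.2) ∨
        n = (ms.1 + 1, ms.2) ∨ n = (ms.1 - 1, ms.2 + 1) ∨ n = (ms.1 + 1, ms.2 + 1) := by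
      obtain ⟨a, b⟩ := n
      simp only [Prod.mk.injEq] at *
      omega
    rcases hx with h | h | h | h | h | h <;> exact ⟨n, by simp [h], hn⟩
  · rintro ⟨c, hc, hl⟩
    refine ⟨c, hl, ?_⟩
    obtain ⟨a, b⟩ := c
    simp only [List.mem_cons, List.not_mem_nil, or_false, Prod.mk.injEq] at hc
    omega
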